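-- pv_equiv track=rewrite | github.com/bigartm/visartm | algo/visualizations/temporalcells.py | top_words_html
-- ===== SOURCE A (Python) =====
-- def top_words_html(tw):
-- 	i = 0
-- 	ret = ""
-- 	for word in tw:
-- 		i+= 1
-- 		ret += word
-- 		if i % 3 == 0:
-- 			ret += "<br>"
-- 		else:
-- 			ret += " "
-- 	return ret
-- ===== SOURCE B (Python) =====
-- def top_words_html(tw):
--     parts = []
--     for i in range(0, len(tw), 3):
--         row = tw[i:i+3]
--         parts.append(' '.join(row))
--         parts.append('<br>' if len(row) == 3 else ' ')
--     return ''.join(parts)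
-- ===== Notes on version B (the rewrite author's own statement) =====
-- stated objective: simpler
-- what changed: B chunks the word list into rows of three and emits ' '.join(row) plus the row terminator per row, replacing A's per-word counter-and-modulo string accumulation.
import Mathlib
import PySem

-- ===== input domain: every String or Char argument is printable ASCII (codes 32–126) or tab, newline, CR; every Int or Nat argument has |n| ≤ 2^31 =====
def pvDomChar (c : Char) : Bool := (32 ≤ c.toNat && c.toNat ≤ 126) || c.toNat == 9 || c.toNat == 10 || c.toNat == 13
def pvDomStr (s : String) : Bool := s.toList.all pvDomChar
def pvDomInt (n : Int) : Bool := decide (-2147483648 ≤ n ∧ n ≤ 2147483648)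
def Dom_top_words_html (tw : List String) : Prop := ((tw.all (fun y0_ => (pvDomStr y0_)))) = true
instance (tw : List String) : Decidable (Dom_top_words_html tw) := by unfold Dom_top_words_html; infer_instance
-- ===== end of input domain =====

-- B replaces A's per-word counter-and-modulo loop by chunking the list into rows of three
-- and emitting each row at once (objective: simpler decomposition; same cost).

-- ===== PORT A =====
-- A's for-loop: state (i, ret); each word bumps i, appends the word, then "<br>" when i % 3 == 0 else " ".
def topWordsLoopA (tw : List String) (i : Int) (ret : String) : String :=
  match tw with
  | [] => ret
  | word :: rest =>
      let i' := i + 1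
      let ret' := ret ++ word
      if PySem.Int.mod i' 3 == 0 then topWordsLoopA rest i' (ret' ++ "<br>")
      else topWordsLoopA rest i' (ret' ++ " ")

def top_words_html (tw : List String) : String := topWordsLoopA tw 0 ""

-- ===== PORT B =====
-- Source B walks the rows tw[i:i+3]; here each row is the next ≤3 elements, ' '.join(row) written out
-- (a row has at most three known elements) followed by "<br>" for a full row and " " otherwise.
def topWordsRowsB (tw : List String) : String :=
  match tw with
  | [] => ""
  | [a] => a ++ " "
  | [a, b] => a ++ " " ++ b ++ " "
  | a :: b :: c :: rest => a ++ " " ++ b ++ " " ++ c ++ "<br>" ++ topWordsRowsB rest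

def top_words_html_alt (tw : List String) : String := topWordsRowsB tw

-- ===== PRECONDITION & SPEC =====
def Spec_top_words_html (tw : List String) (out : String) : Prop := out = top_words_html_alt tw
instance (tw : List String) (out : String) : Decidable (Spec_top_words_html tw out) := by unfold Spec_top_words_html; infer_instance

-- ===== CLAIM (what is proved, stated in full; the proofs are below) =====
def Claim_equal_top_words_html : Prop := ∀ (tw : List String), Dom_top_words_html tw → Spec_top_words_html tw (top_words_html tw)

-- ===== LEMMAS AND PROOFS =====

-- A's loop, started at any counter divisible by 3, appends exactly B's row rendering.
theorem topWordsLoopA_eq (tw : List String) :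
    ∀ (i : Int) (ret : String), PySem.Int.mod i 3 = 0 →
      topWordsLoopA tw i ret = ret ++ topWordsRowsB tw := by
  induction tw using topWordsRowsB.induct with
  | case1 =>
      intro i ret _
      simp [topWordsLoopA, topWordsRowsB]
  | case2 a =>
      intro i ret h
      rw [PySem.Int.mod_eq_emod_of_pos (by omega)] at h
      have d1 : ¬ (3:Int) ∣ i + 1 := by omega
      simp [topWordsLoopA, topWordsRowsB, d1, String.append_assoc]
  | case3 a b =>
      intro i ret h
      rw [PySem.Int.mod_eq_emod_of_pos (by omega)] at h
      have d1 : ¬ (3:Int) ∣ i + 1 := by omega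
      have d2 : ¬ (3:Int) ∣ i + 1 + 1 := by omega
      simp [topWordsLoopA, topWordsRowsB, d1, d2, String.append_assoc]
  | case4 a b c rest ih =>
      intro i ret h
      rw [PySem.Int.mod_eq_emod_of_pos (by omega)] at h
      have d1 : ¬ (3:Int) ∣ i + 1 := by omega
      have d2 : ¬ (3:Int) ∣ i + 1 + 1 := by omega
      have d3 : (3:Int) ∣ i + 1 + 1 + 1 := by omega
      have h3 : PySem.Int.mod (i + 1 + 1 + 1) 3 = 0 := by
        rw [PySem.Int.mod_eq_emod_of_pos (by omega)]; omega
      simp [topWordsLoopA, topWordsRowsB, d1, d2, d3, String.append_assoc, ih _ _ h3]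

-- ===== VERDICT (by name: the statement is the Claim_ definition above) =====
theorem top_words_html_spec : Claim_equal_top_words_html := by
  intro tw _
  unfold Spec_top_words_html top_words_html top_words_html_alt
  rw [topWordsLoopA_eq tw 0 "" (by decide)]
  simp
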